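-- pv_equiv track=rewrite | github.com/oaayoub/Graph-Solver | Algo.py | BFS
-- ===== SOURCE A (Python) =====
-- def BFS(graph, S, G, Queue=[], visited=[], path=[]):
--     extras = []
--     queue = [(S, [S])] #S , [S]
--     visited = set()
--
--     while queue:
--         s, path = queue.pop(0)
--         '''if s in G:
--             return path, extras'''
--
--         for goal in G:
--             if s == goal:
--                 return path, extras
--
--         extras.append(s)
--         visited.add(s)
--         if s in graph:
--             for node in graph[s]:
--                 #search cildren
--                 '''
--                 if node == G:
--                     return path + [G] , extras
--                 '''
--                 if node not in visited:
--                     visited.add(node)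
--                     queue.append((node, path + [node]))
--
--     return [], extras
-- ===== SOURCE B (Python) =====
-- def BFS(graph, S, G, Queue=[], visited=[], path=[]):
--     # phase 1: run the whole BFS to exhaustion, recording pop order and parent pointers
--     parent = {S: None}
--     order = []
--     frontier = [S]
--     while frontier:
--         s = frontier.pop(0)
--         order.append(s)
--         if s in graph:
--             for node in graph[s]:
--                 if node not in parent:
--                     parent[node] = s
--                     frontier.append(node)
--     # phase 2: scan the pop order for the first goal; reconstruct path via parents
--     extras = []
--     for s in order:
--         for goal in G:
--             if s == goal:
--                 rev = []
--                 cur = s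
--                 while cur is not None:
--                     rev.append(cur)
--                     cur = parent[cur]
--                 return rev[::-1], extras
--         extras.append(s)
--     return [], extras
-- ===== Notes on version B (the rewrite author's own statement) =====
-- stated objective: alternative
-- what changed: B splits A's single stop-at-goal loop with a queue of (node, full-path-copy) pairs into two phases: phase 1 runs the BFS to exhaustion with a node-only frontier and a parent-pointer dict (no goal check, no path copies), phase 2 scans the recorded pop order for the first goal and reconstructs the path by walking parent pointers and reversing.
import Mathlib
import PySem

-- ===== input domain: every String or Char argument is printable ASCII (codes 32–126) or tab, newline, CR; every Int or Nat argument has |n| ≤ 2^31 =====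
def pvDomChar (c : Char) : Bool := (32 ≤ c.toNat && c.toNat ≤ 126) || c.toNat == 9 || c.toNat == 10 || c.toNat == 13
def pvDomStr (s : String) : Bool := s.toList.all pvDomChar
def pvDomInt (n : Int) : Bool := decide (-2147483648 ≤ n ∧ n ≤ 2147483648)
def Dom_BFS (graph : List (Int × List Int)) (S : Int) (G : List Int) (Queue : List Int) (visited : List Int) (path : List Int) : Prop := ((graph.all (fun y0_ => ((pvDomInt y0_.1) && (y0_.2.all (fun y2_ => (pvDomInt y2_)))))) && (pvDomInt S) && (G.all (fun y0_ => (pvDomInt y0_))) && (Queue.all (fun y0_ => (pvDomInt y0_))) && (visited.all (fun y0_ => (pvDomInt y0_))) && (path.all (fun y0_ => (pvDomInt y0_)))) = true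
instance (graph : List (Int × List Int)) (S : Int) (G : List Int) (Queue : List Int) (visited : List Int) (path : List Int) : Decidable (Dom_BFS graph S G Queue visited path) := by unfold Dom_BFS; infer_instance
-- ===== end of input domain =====

-- B is a two-phase alternative: phase 1 runs the whole BFS to exhaustion with a node-only
-- frontier and parent-pointer dict (no goal check, no path copies), phase 2 scans the pop
-- order for the first goal and reconstructs the path; same observable result as A
-- (the Queue/visited/path parameters are dead in both, as in A).

-- Both loop ports use the same fuel bound (a totality guard only: the BFS loop pops at
-- most 1 + one push per distinct discovered node, which this bound dominates).
def bfsFuel (graph : List (Int × List Int)) : Nat :=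
  2 + graph.foldl (fun a p => a + 1 + p.2.length) 0

-- ===== PORT A =====
-- literal port of A's while loop: queue of (node, path) pairs, visited set, in-loop goal check
def bfsLoopA (graph : List (Int × List Int)) (G : List Int) :
    Nat → List (Int × List Int) → PySem.Set Int → List Int → List Int × List Int
  | 0, _, _, extras => ([], extras)                       -- fuel guard (never hit: see bfsFuel)
  | _ + 1, [], _, extras => ([], extras)
  | fuel + 1, (s, path) :: rest, vis, extras =>
    if G.any (fun goal => s == goal) then (path, extras)  -- for goal in G: if s == goal: return
    else
      let extras' := extras ++ [s]
      let vis' := PySem.Set.add vis s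
      match (PySem.Dict.mk graph).get? s with             -- if s in graph: graph[s]
      | none => bfsLoopA graph G fuel rest vis' extras'
      | some nbrs =>
        let st := nbrs.foldl
          (fun (vq : PySem.Set Int × List (Int × List Int)) node =>
            if PySem.Set.contains vq.1 node then vq
            else (PySem.Set.add vq.1 node, vq.2 ++ [(node, path ++ [node])])) (vis', rest)
        bfsLoopA graph G fuel st.2 st.1 extras'

def BFS (graph : List (Int × List Int)) (S : Int) (G : List Int) (Queue : List Int) (visited : List Int) (path : List Int) : List Int × List Int :=
  bfsLoopA graph G (bfsFuel graph) [(S, [S])] [] []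

-- ===== PORT B =====
-- phase 1: run the BFS to exhaustion, recording pop order and parent pointers (no goal check)
def bfsTraverse (graph : List (Int × List Int)) :
    Nat → List Int → PySem.Dict Int (Option Int) → List Int → List Int × PySem.Dict Int (Option Int)
  | 0, _, parent, order => (order, parent)                -- fuel guard (never hit: see bfsFuel)
  | _ + 1, [], parent, order => (order, parent)
  | fuel + 1, s :: rest, parent, order =>
    let order' := order ++ [s]
    match (PySem.Dict.mk graph).get? s with
    | none => bfsTraverse graph fuel rest parent order'
    | some nbrs =>
      let st := nbrs.foldl
        (fun (pf : PySem.Dict Int (Option Int) × List Int) node =>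
          if pf.1.contains node then pf
          else (pf.1.insert node (some s), pf.2 ++ [node])) (parent, rest)
      bfsTraverse graph fuel st.2 st.1 order'

-- walk parent pointers from cur, appending; fuel = dict size + 1 is a totality guard
-- (a parent chain never revisits a key); a missing key (Python KeyError, unreachable) stops.
def bfsWalk (parent : PySem.Dict Int (Option Int)) : Nat → Int → List Int → List Int
  | 0, _, rev => rev
  | fuel + 1, cur, rev =>
    let rev' := rev ++ [cur]
    match parent.get? cur with
    | some (some p) => bfsWalk parent fuel p rev'
    | _ => rev'

-- phase 2: scan the pop order for the first goal; reconstruct the path via parents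
def bfsFinish (G : List Int) (parent : PySem.Dict Int (Option Int)) :
    List Int → List Int → List Int × List Int
  | extras, [] => ([], extras)
  | extras, s :: rest =>
    if G.any (fun goal => s == goal) then
      ((bfsWalk parent (parent.size + 1) s []).reverse, extras)
    else bfsFinish G parent (extras ++ [s]) rest

def BFS_alt (graph : List (Int × List Int)) (S : Int) (G : List Int) (Queue : List Int) (visited : List Int) (path : List Int) : List Int × List Int :=
  let r := bfsTraverse graph (bfsFuel graph) [S] (PySem.Dict.mk [(S, none)]) []
  bfsFinish G r.2 [] r.1

-- ===== PRECONDITION & SPEC =====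
def Spec_BFS (graph : List (Int × List Int)) (S : Int) (G : List Int) (Queue : List Int) (visited : List Int) (path : List Int) (out : List Int × List Int) : Prop := out = BFS_alt graph S G Queue visited path
instance (graph : List (Int × List Int)) (S : Int) (G : List Int) (Queue : List Int) (visited : List Int) (path : List Int) (out : List Int × List Int) : Decidable (Spec_BFS graph S G Queue visited path out) := by unfold Spec_BFS; infer_instance

-- ===== CLAIM (what is proved, stated in full; the proofs are below) =====
def Claim_equal_BFS : Prop := ∀ (graph : List (Int × List Int)) (S : Int) (G : List Int) (Queue : List Int) (visited : List Int) (path : List Int), Dom_BFS graph S G Queue visited path → Spec_BFS graph S G Queue visited path (BFS graph S G Queue visited path)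

-- ===== LEMMAS AND PROOFS =====

-- parent-pointer chain from n back to the root, listed root-first:
-- BfsChain parent n p says p is the root→n path recorded in parent.
inductive BfsChain (parent : PySem.Dict Int (Option Int)) : Int → List Int → Prop
  | base (n : Int) : parent.get? n = some none → BfsChain parent n [n]
  | step (n m : Int) (p : List Int) : parent.get? n = some (some m) →
      BfsChain parent m p → BfsChain parent n (p ++ [n])

lemma bfsChain_contains {parent : PySem.Dict Int (Option Int)} {n : Int} {p : List Int}
    (h : BfsChain parent n p) : parent.contains n = true := by
  rw [PySem.Dict.contains_eq_isSome_get?]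
  cases h with
  | base _ hn => simp [hn]
  | step _ _ _ hn _ => simp [hn]

lemma bfsWalk_chain {parent : PySem.Dict Int (Option Int)} {n : Int} {p : List Int}
    (h : BfsChain parent n p) :
    ∀ (f : Nat) (acc : List Int), p.length ≤ f → bfsWalk parent f n acc = acc ++ p.reverse := by
  induction h with
  | base n hn =>
      intro f acc hf
      match f with
      | 0 => simp at hf
      | f + 1 => simp [bfsWalk, hn]
  | step n m p hn _ ih =>
      intro f acc hf
      match f with
      | 0 => simp at hf
      | f + 1 =>
          simp only [List.length_append, List.length_cons, List.length_nil] at hf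
          simp [bfsWalk, hn, ih f (acc ++ [n]) (by omega)]

lemma bfsChain_mono {parent parent' : PySem.Dict Int (Option Int)}
    (hm : ∀ y v, parent.get? y = some v → parent'.get? y = some v) :
    ∀ {n : Int} {p : List Int}, BfsChain parent n p → BfsChain parent' n p := by
  intro n p h
  induction h with
  | base n hn => exact BfsChain.base n (hm n none hn)
  | step n m p hn _ ih => exact BfsChain.step n m p (hm n (some m) hn) ih

lemma get?_insert_fresh {parent : PySem.Dict Int (Option Int)} {k : Int} {w : Option Int}
    (hk : parent.contains k = false) :
    ∀ y v, parent.get? y = some v → (parent.insert k w).get? y = some v := by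
  intro y v h
  have hy : y ≠ k := by
    intro e; subst e
    rw [PySem.Dict.contains_eq_isSome_get?, h] at hk; simp at hk
  rw [PySem.Dict.get?_insert_of_ne]
  · exact h
  · exact hy

-- B's neighbour fold only extends parent by fresh keys: old bindings survive, size grows
lemma fold_extends (s : Int) :
    ∀ (nbrs : List Int) (p : PySem.Dict Int (Option Int)) (q : List Int),
      (∀ y v, p.get? y = some v →
        (nbrs.foldl (fun (pf : PySem.Dict Int (Option Int) × List Int) node =>
          if pf.1.contains node then pf
          else (pf.1.insert node (some s), pf.2 ++ [node])) (p, q)).1.get? y = some v) ∧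
      p.size ≤ (nbrs.foldl (fun (pf : PySem.Dict Int (Option Int) × List Int) node =>
          if pf.1.contains node then pf
          else (pf.1.insert node (some s), pf.2 ++ [node])) (p, q)).1.size := by
  intro nbrs
  induction nbrs with
  | nil => intro p q; exact ⟨fun y v h => h, le_rfl⟩
  | cons node rest ih =>
      intro p q
      simp only [List.foldl_cons]
      by_cases hc : p.contains node = true
      · rw [if_pos hc]; exact ih p q
      · rw [if_neg (by simp [Bool.not_eq_true] at hc ⊢; exact hc)]
        have hc' : p.contains node = false := by rw [← Bool.not_eq_true]; exact hc
        obtain ⟨he, hs⟩ := ih (p.insert node (some s)) (q ++ [node])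
        refine ⟨fun y v h => he y v (get?_insert_fresh hc' y v h), ?_⟩
        have : (p.insert node (some s)).size = p.size + 1 := by
          rw [PySem.Dict.size_insert, hc']; simp
        omega

-- phase 1 only appends to order and extends parent
lemma traverse_props (graph : List (Int × List Int)) :
    ∀ (fuel : Nat) (frontier : List Int) (p : PySem.Dict Int (Option Int)) (order : List Int),
      (∃ delta, (bfsTraverse graph fuel frontier p order).1 = order ++ delta) ∧
      (∀ y v, p.get? y = some v → (bfsTraverse graph fuel frontier p order).2.get? y = some v) ∧
      p.size ≤ (bfsTraverse graph fuel frontier p order).2.size := by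
  intro fuel
  induction fuel with
  | zero => intro frontier p order; exact ⟨⟨[], by simp [bfsTraverse]⟩, fun y v h => h, le_rfl⟩
  | succ fuel ih =>
      intro frontier p order
      match frontier with
      | [] => exact ⟨⟨[], by simp [bfsTraverse]⟩, fun y v h => h, le_rfl⟩
      | s :: rest =>
          cases hgs : (PySem.Dict.mk graph).get? s with
          | none =>
              simp only [bfsTraverse, hgs]
              obtain ⟨⟨delta, hd⟩, he, hs⟩ := ih rest p (order ++ [s])
              exact ⟨⟨[s] ++ delta, by rw [hd]; simp⟩, he, hs⟩
          | some nbrs =>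
              simp only [bfsTraverse, hgs]
              obtain ⟨hfe, hfs⟩ := fold_extends s nbrs p rest
              obtain ⟨⟨delta, hd⟩, he, hs⟩ := ih _ _ (order ++ [s])
              exact ⟨⟨[s] ++ delta, by rw [hd]; simp⟩,
                fun y v h => he y v (hfe y v h), le_trans hfs hs⟩

-- phase 2 on a goal-free list returns ([], everything)
lemma finish_none (G : List Int) (parent : PySem.Dict Int (Option Int)) :
    ∀ (l acc : List Int), (∀ x ∈ l, G.any (fun goal => x == goal) = false) →
      bfsFinish G parent acc l = ([], acc ++ l) := by
  intro l
  induction l with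
  | nil => intro acc _; simp [bfsFinish]
  | cons x rest ih =>
      intro acc h
      have hx := h x (List.mem_cons_self ..)
      simp only [bfsFinish, hx, Bool.false_eq_true, if_false]
      rw [ih (acc ++ [x]) (fun y hy => h y (List.mem_cons_of_mem _ hy))]
      simp

-- phase 2 skips a goal-free prefix, accumulating it into extras
lemma finish_skip (G : List Int) (parent : PySem.Dict Int (Option Int)) :
    ∀ (l1 : List Int) (acc l2 : List Int),
      (∀ x ∈ l1, G.any (fun goal => x == goal) = false) →
      bfsFinish G parent acc (l1 ++ l2) = bfsFinish G parent (acc ++ l1) l2 := by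
  intro l1
  induction l1 with
  | nil => intro acc l2 _; simp
  | cons x rest ih =>
      intro acc l2 h
      have hx := h x (List.mem_cons_self ..)
      simp only [List.cons_append, bfsFinish, hx, Bool.false_eq_true, if_false]
      rw [ih (acc ++ [x]) l2 (fun y hy => h y (List.mem_cons_of_mem _ hy))]
      simp

-- one fold: A's neighbor loop over (visited, queue) matches B's over (parent, frontier)
lemma fold_sync (s : Int) (path : List Int) :
    ∀ (nbrs : List Int) (v : PySem.Set Int) (q : List (Int × List Int))
      (p : PySem.Dict Int (Option Int)),
      (∀ x : Int, x ∈ v ↔ p.contains x = true) →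
      (∀ np ∈ q, BfsChain p np.1 np.2 ∧ np.2.length ≤ p.size) →
      (BfsChain p s path ∧ path.length ≤ p.size) →
      ((∀ x : Int, x ∈ (nbrs.foldl
          (fun (vq : PySem.Set Int × List (Int × List Int)) node =>
            if PySem.Set.contains vq.1 node then vq
            else (PySem.Set.add vq.1 node, vq.2 ++ [(node, path ++ [node])])) (v, q)).1 ↔
          (nbrs.foldl
          (fun (pf : PySem.Dict Int (Option Int) × List Int) node =>
            if pf.1.contains node then pf
            else (pf.1.insert node (some s), pf.2 ++ [node])) (p, q.map Prod.fst)).1.contains x = true) ∧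
       (nbrs.foldl
          (fun (pf : PySem.Dict Int (Option Int) × List Int) node =>
            if pf.1.contains node then pf
            else (pf.1.insert node (some s), pf.2 ++ [node])) (p, q.map Prod.fst)).2 =
         ((nbrs.foldl
          (fun (vq : PySem.Set Int × List (Int × List Int)) node =>
            if PySem.Set.contains vq.1 node then vq
            else (PySem.Set.add vq.1 node, vq.2 ++ [(node, path ++ [node])])) (v, q)).2).map Prod.fst ∧
       (∀ np ∈ (nbrs.foldl
          (fun (vq : PySem.Set Int × List (Int × List Int)) node =>
            if PySem.Set.contains vq.1 node then vq
            else (PySem.Set.add vq.1 node, vq.2 ++ [(node, path ++ [node])])) (v, q)).2,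
          BfsChain (nbrs.foldl
          (fun (pf : PySem.Dict Int (Option Int) × List Int) node =>
            if pf.1.contains node then pf
            else (pf.1.insert node (some s), pf.2 ++ [node])) (p, q.map Prod.fst)).1 np.1 np.2 ∧
          np.2.length ≤ ((nbrs.foldl
          (fun (pf : PySem.Dict Int (Option Int) × List Int) node =>
            if pf.1.contains node then pf
            else (pf.1.insert node (some s), pf.2 ++ [node])) (p, q.map Prod.fst)).1).size) ∧
       (∀ x ∈ v, x ∈ (nbrs.foldl
          (fun (vq : PySem.Set Int × List (Int × List Int)) node =>
            if PySem.Set.contains vq.1 node then vq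
            else (PySem.Set.add vq.1 node, vq.2 ++ [(node, path ++ [node])])) (v, q)).1)) := by
  intro nbrs
  induction nbrs with
  | nil => intro v q p h1 h3 h4; exact ⟨h1, rfl, h3, fun x hx => hx⟩
  | cons node rest ih =>
      intro v q p h1 h3 h4
      by_cases hv : node ∈ v
      · have hB : p.contains node = true := (h1 node).1 hv
        have hstepA : (if PySem.Set.contains v node then (v, q)
            else (PySem.Set.add v node, q ++ [(node, path ++ [node])])) = (v, q) := by
          rw [if_pos]; rw [PySem.Set.contains_iff]; exact hv
        have hstepB : (if p.contains node then (p, q.map Prod.fst)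
            else (p.insert node (some s), q.map Prod.fst ++ [node])) = (p, q.map Prod.fst) :=
          if_pos hB
        simp only [List.foldl_cons]
        rw [hstepA, hstepB]
        exact ih v q p h1 h3 h4
      · have hB : p.contains node = false := by
          rw [← Bool.not_eq_true]; intro hc; exact hv ((h1 node).2 hc)
        have hmono := @get?_insert_fresh p node (some s) hB
        have hsize : (p.insert node (some s)).size = p.size + 1 := by
          rw [PySem.Dict.size_insert, hB]; simp
        have h4' : BfsChain (p.insert node (some s)) s path ∧
            path.length ≤ (p.insert node (some s)).size :=
          ⟨bfsChain_mono hmono h4.1, by omega⟩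
        have hnew : BfsChain (p.insert node (some s)) node (path ++ [node]) :=
          BfsChain.step node s path (PySem.Dict.get?_insert_self p node (some s)) h4'.1
        have h1' : ∀ x : Int, x ∈ PySem.Set.add v node ↔
            (p.insert node (some s)).contains x = true := by
          intro x
          rw [PySem.Set.mem_add, PySem.Dict.contains_insert]
          constructor
          · rintro (hx | rfl)
            · simp [(h1 x).1 hx]
            · simp
          · intro hx
            rcases Bool.or_eq_true_iff.1 hx with hx | hx
            · right; exact (beq_iff_eq).1 hx
            · left; exact (h1 x).2 hx
        have h3' : ∀ np ∈ q ++ [(node, path ++ [node])],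
            BfsChain (p.insert node (some s)) np.1 np.2 ∧
            np.2.length ≤ (p.insert node (some s)).size := by
          intro np hnp
          rcases List.mem_append.1 hnp with hnp | hnp
          · obtain ⟨hc, hl⟩ := h3 np hnp
            exact ⟨bfsChain_mono hmono hc, by omega⟩
          · simp only [List.mem_singleton] at hnp; subst hnp
            refine ⟨hnew, ?_⟩
            simp only [List.length_append, List.length_cons, List.length_nil]
            omega
        have hstepA : (if PySem.Set.contains v node then (v, q)
            else (PySem.Set.add v node, q ++ [(node, path ++ [node])]))
            = (PySem.Set.add v node, q ++ [(node, path ++ [node])]) := by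
          rw [if_neg]; rw [PySem.Set.contains_iff]; exact hv
        have hstepB : (if p.contains node then (p, q.map Prod.fst)
            else (p.insert node (some s), q.map Prod.fst ++ [node]))
            = (p.insert node (some s), q.map Prod.fst ++ [node]) := by
          rw [if_neg]; rw [hB]; simp
        have key := ih (PySem.Set.add v node) (q ++ [(node, path ++ [node])])
          (p.insert node (some s)) h1' h3' h4'
        simp only [List.map_append, List.map_cons, List.map_nil] at key
        simp only [List.foldl_cons]
        rw [hstepA, hstepB]
        exact ⟨key.1, key.2.1, key.2.2.1,
          fun x hx => key.2.2.2 x (by rw [PySem.Set.mem_add]; exact Or.inl hx)⟩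

-- the main invariant: A's stop-at-goal loop equals B's full traversal followed by the scan
lemma loop_sync (graph : List (Int × List Int)) (G : List Int) (S : Int) :
    ∀ (fuel : Nat) (queue : List (Int × List Int)) (vis : PySem.Set Int)
      (parent : PySem.Dict Int (Option Int)) (extras : List Int),
      (∀ x : Int, (x ∈ vis ∨ x = S) ↔ parent.contains x = true) →
      (∀ np ∈ queue, BfsChain parent np.1 np.2 ∧ np.2.length ≤ parent.size) →
      (S ∈ vis ∨ (queue = [(S, [S])] ∧ vis = [])) →
      (∀ x ∈ extras, G.any (fun goal => x == goal) = false) →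
      bfsLoopA graph G fuel queue vis extras
        = bfsFinish G (bfsTraverse graph fuel (queue.map Prod.fst) parent extras).2 []
            (bfsTraverse graph fuel (queue.map Prod.fst) parent extras).1 := by
  intro fuel
  induction fuel with
  | zero =>
      intro queue vis parent extras _ _ _ hE
      show ([], extras) = bfsFinish G parent [] extras
      rw [finish_none G parent extras [] hE]
      simp
  | succ fuel ih =>
      intro queue vis parent extras hJ hC hM hE
      match queue with
      | [] =>
          show ([], extras) = bfsFinish G parent [] extras
          rw [finish_none G parent extras [] hE]
          simp
      | (s, path) :: rest =>
          obtain ⟨hchain, hlen⟩ := hC (s, path) (List.mem_cons_self ..)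
          have hlen' : path.length ≤ parent.size := hlen
          simp only [List.map_cons]
          by_cases hg : G.any (fun goal => s == goal) = true
          · -- A returns (path, extras); B's traversal continues but the scan stops at s
            simp only [bfsLoopA, hg, if_true]
            cases hgs : (PySem.Dict.mk graph).get? s with
            | none =>
                simp only [bfsTraverse, hgs]
                obtain ⟨⟨delta, hd⟩, he, hs⟩ := traverse_props graph fuel (rest.map Prod.fst)
                  parent (extras ++ [s])
                rw [hd, show extras ++ [s] ++ delta = extras ++ ([s] ++ delta) from by simp,
                  finish_skip G _ extras [] ([s] ++ delta) hE]
                simp only [List.nil_append, List.singleton_append, bfsFinish, hg, if_true]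
                rw [bfsWalk_chain (bfsChain_mono he hchain) _ [] (by omega)]
                simp
            | some nbrs =>
                simp only [bfsTraverse, hgs]
                obtain ⟨hfe, hfs⟩ := fold_extends s nbrs parent (rest.map Prod.fst)
                obtain ⟨⟨delta, hd⟩, he, hs⟩ := traverse_props graph fuel _ _ (extras ++ [s])
                rw [hd, show extras ++ [s] ++ delta = extras ++ ([s] ++ delta) from by simp,
                  finish_skip G _ extras [] ([s] ++ delta) hE]
                simp only [List.nil_append, List.singleton_append, bfsFinish, hg, if_true]
                have hch : BfsChain (bfsTraverse graph fuel _ _ (extras ++ [s])).2 s path :=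
                  bfsChain_mono he (bfsChain_mono hfe hchain)
                rw [bfsWalk_chain hch _ [] (by have := le_trans hfs hs; omega)]
                simp
          · have hSmem : S ∈ PySem.Set.add vis s := by
              rcases hM with hM | ⟨hq, _⟩
              · rw [PySem.Set.mem_add]; exact Or.inl hM
              · injection hq with h1 _
                injection h1 with hs _
                rw [hs, PySem.Set.mem_add]; exact Or.inr rfl
            have h1 : ∀ x : Int, x ∈ PySem.Set.add vis s ↔ parent.contains x = true := by
              intro x
              rw [PySem.Set.mem_add]
              constructor
              · rintro (hx | rfl)
                · exact (hJ x).1 (Or.inl hx)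
                · exact bfsChain_contains hchain
              · intro hx
                rcases (hJ x).2 hx with hx' | rfl
                · exact Or.inl hx'
                · rw [PySem.Set.mem_add] at hSmem; exact hSmem
            have h3 : ∀ np ∈ rest, BfsChain parent np.1 np.2 ∧ np.2.length ≤ parent.size :=
              fun np hnp => hC np (List.mem_cons_of_mem _ hnp)
            have hE' : ∀ x ∈ extras ++ [s], G.any (fun goal => x == goal) = false := by
              intro x hx
              rcases List.mem_append.1 hx with hx | hx
              · exact hE x hx
              · simp only [List.mem_singleton] at hx; subst hx
                rw [← Bool.not_eq_true]; exact hg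
            cases hgs : (PySem.Dict.mk graph).get? s with
            | none =>
                simp only [bfsLoopA, bfsTraverse, hg, if_false, Bool.false_eq_true, hgs]
                refine ih rest (PySem.Set.add vis s) parent (extras ++ [s]) ?_ h3
                  (Or.inl hSmem) hE'
                intro x
                constructor
                · rintro (hx | rfl)
                  · exact (h1 x).1 hx
                  · exact (hJ x).1 (Or.inr rfl)
                · intro hx; exact Or.inl ((h1 x).2 hx)
            | some nbrs =>
                obtain ⟨f1, f2, f3, f5⟩ :=
                  fold_sync s path nbrs (PySem.Set.add vis s) rest parent h1 h3 ⟨hchain, hlen⟩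
                simp only [bfsLoopA, bfsTraverse, hg, if_false, Bool.false_eq_true, hgs]
                rw [f2]
                refine ih _ _ _ (extras ++ [s]) ?_ f3 (Or.inl (f5 S hSmem)) hE'
                intro x
                constructor
                · rintro (hx | rfl)
                  · exact (f1 x).1 hx
                  · exact (f1 _).1 (f5 _ hSmem)
                · intro hx; exact Or.inl ((f1 x).2 hx)

-- ===== VERDICT (by name: the statement is the Claim_ definition above) =====
theorem BFS_spec : Claim_equal_BFS := by
  intro graph S G Queue visited path _
  unfold Spec_BFS BFS BFS_alt
  have hget : (PySem.Dict.mk [(S, none)] : PySem.Dict Int (Option Int)).get? S = some none := by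
    rw [PySem.Dict.get?_mk_cons]; simp
  have := loop_sync graph G S (bfsFuel graph) [(S, [S])] [] (PySem.Dict.mk [(S, none)]) []
    (by
      intro x
      rw [PySem.Dict.contains_eq_isSome_get?, PySem.Dict.get?_mk_cons]
      constructor
      · rintro (hx | rfl)
        · simp at hx
        · simp
      · intro hx
        by_cases hxs : x = S
        · exact Or.inr hxs
        · exfalso
          rw [if_neg (by simp [Ne.symm hxs])] at hx
          rw [show (PySem.Dict.mk ([] : List (Int × Option Int))).get? x = none from rfl] at hx
          simp at hx)
    (by
      intro np hnp
      simp only [List.mem_singleton] at hnp; subst hnp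
      exact ⟨BfsChain.base S hget, by simp [PySem.Dict.size]⟩)
    (Or.inr ⟨rfl, rfl⟩)
    (by intro x hx; simp at hx)
  simpa using this
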